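-- pv_equiv track=rewrite | github.com/Sportinger/Neuer-Ordner--6- | main.py | generate_diamond_structure
-- ===== SOURCE A (Python) =====
-- def generate_diamond_structure(layer_count):
--     cubes = []
--     max_layer = layer_count // 2
--     for layer in range(layer_count):
--         if layer <= max_layer:
--             # Expanding layers
--             size = 2 * layer + 1
--             offset = -layer
--             y = layer
--         else:
--             # Contracting layers
--             layer_from_top = layer_count - 1 - layer
--             size = 2 * layer_from_top + 1
--             offset = -layer_from_top
--             y = layer
--         for x in range(size):
--             for z in range(size):
--                 if x == 0 or x == size - 1 or z == 0 or z == size - 1: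
--                     cubes.append((x + offset, y, z + offset))
--     return cubes
-- ===== SOURCE B (Python) =====
-- def generate_diamond_structure(layer_count):
--     # Visit only perimeter cells: full z-row for the two edge x's, just the two
--     # edge z's otherwise (same output order as scanning the full grid row-major).
--     cubes = []
--     for layer in range(layer_count):
--         k = layer if 2 * layer <= layer_count else layer_count - 1 - layer
--         size = 2 * k + 1
--         off = -k
--         for x in range(size):
--             if x == 0 or x == size - 1:
--                 for z in range(size):
--                     cubes.append((x + off, layer, z + off))
--             else:
--                 cubes.append((x + off, layer, off))
--                 cubes.append((x + off, layer, size - 1 + off))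
--     return cubes
-- ===== Notes on version B (the rewrite author's own statement) =====
-- stated objective: faster
-- what changed: Instead of scanning every cell of each layer's size x size grid and filtering for the perimeter, B walks only the perimeter: the full z-row for the two edge x's and just the two edge z's for interior x's, in the same row-major order.
import Mathlib
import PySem

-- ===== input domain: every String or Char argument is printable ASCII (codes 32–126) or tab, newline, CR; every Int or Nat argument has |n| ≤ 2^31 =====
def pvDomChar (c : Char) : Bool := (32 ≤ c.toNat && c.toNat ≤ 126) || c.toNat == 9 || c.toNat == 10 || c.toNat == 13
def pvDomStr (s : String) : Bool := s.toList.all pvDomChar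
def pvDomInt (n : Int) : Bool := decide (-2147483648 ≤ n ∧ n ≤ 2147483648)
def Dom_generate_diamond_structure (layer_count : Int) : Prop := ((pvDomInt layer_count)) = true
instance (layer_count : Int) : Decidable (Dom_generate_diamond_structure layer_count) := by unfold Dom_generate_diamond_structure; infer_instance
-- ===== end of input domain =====

-- B visits only the perimeter cells of each layer (full z-row for the two edge
-- x's, just the two edge z's otherwise) instead of filtering the whole x×z grid;
-- objective: faster (per layer, work proportional to the perimeter, not the area).

-- ===== PORT A =====
-- A's loop body for one layer (the if/else assigning size/offset/y, then the nested x,z scan)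
def pvStepA (layer_count : Int) (cubes : List (List Int)) (layer : Int) : List (List Int) :=
  let max_layer := PySem.Int.floordiv layer_count 2
  let t : Int × Int × Int :=
    if layer ≤ max_layer then
      (2 * layer + 1, -layer, layer)
    else
      let layer_from_top := layer_count - 1 - layer
      (2 * layer_from_top + 1, -layer_from_top, layer)
  let size := t.1
  let offset := t.2.1
  let y := t.2.2
  (PySem.List.pyRange 0 size 1).foldl (fun c1 x =>
    (PySem.List.pyRange 0 size 1).foldl (fun c2 z =>
      if x == 0 || x == size - 1 || z == 0 || z == size - 1 then
        c2 ++ [[x + offset, y, z + offset]]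
      else c2) c1) cubes

def generate_diamond_structure (layer_count : Int) : List (List Int) :=
  (PySem.List.pyRange 0 layer_count 1).foldl (pvStepA layer_count) []

-- ===== PORT B =====
-- B's loop body for one layer: only perimeter cells are visited
def pvStepB (layer_count : Int) (cubes : List (List Int)) (layer : Int) : List (List Int) :=
  let k := if 2 * layer ≤ layer_count then layer else layer_count - 1 - layer
  let size := 2 * k + 1
  let off := -k
  (PySem.List.pyRange 0 size 1).foldl (fun c x =>
    if x == 0 || x == size - 1 then
      c ++ (PySem.List.pyRange 0 size 1).map (fun z => [x + off, layer, z + off])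
    else
      c ++ [[x + off, layer, off], [x + off, layer, size - 1 + off]]) cubes

def generate_diamond_structure_alt (layer_count : Int) : List (List Int) :=
  (PySem.List.pyRange 0 layer_count 1).foldl (pvStepB layer_count) []

-- ===== PRECONDITION & SPEC =====
def Spec_generate_diamond_structure (layer_count : Int) (out : List (List Int)) : Prop := out = generate_diamond_structure_alt layer_count
instance (layer_count : Int) (out : List (List Int)) : Decidable (Spec_generate_diamond_structure layer_count out) := by unfold Spec_generate_diamond_structure; infer_instance

-- ===== CLAIM (what is proved, stated in full; the proofs are below) =====
def Claim_equal_generate_diamond_structure : Prop := ∀ (layer_count : Int), Dom_generate_diamond_structure layer_count → Spec_generate_diamond_structure layer_count (generate_diamond_structure layer_count)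

-- ===== LEMMAS AND PROOFS =====

-- what A emits for one layer, as a flatMap
def pvGA (layer_count layer : Int) : List (List Int) :=
  let t : Int × Int × Int :=
    if layer ≤ PySem.Int.floordiv layer_count 2 then
      (2 * layer + 1, -layer, layer)
    else
      (2 * (layer_count - 1 - layer) + 1, -(layer_count - 1 - layer), layer)
  (PySem.List.pyRange 0 t.1 1).flatMap (fun x =>
    ((PySem.List.pyRange 0 t.1 1).filter
      (fun z => x == 0 || x == t.1 - 1 || z == 0 || z == t.1 - 1)).map
      (fun z => [x + t.2.1, t.2.2, z + t.2.1]))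

-- what B emits for one layer, as a flatMap
def pvGB (layer_count layer : Int) : List (List Int) :=
  let k := if 2 * layer ≤ layer_count then layer else layer_count - 1 - layer
  (PySem.List.pyRange 0 (2 * k + 1) 1).flatMap (fun x =>
    if x == 0 || x == 2 * k + 1 - 1 then
      (PySem.List.pyRange 0 (2 * k + 1) 1).map (fun z => [x + -k, layer, z + -k])
    else
      [[x + -k, layer, -k], [x + -k, layer, 2 * k + 1 - 1 + -k]])

-- a fold whose step always appends is an append of a flatMap
theorem pv_foldl_ext_append {α β : Type} (f : List α → β → List α) (g : β → List α)
    (h : ∀ acc x, f acc x = acc ++ g x) :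
    ∀ (l : List β) (acc : List α), l.foldl f acc = acc ++ l.flatMap g := by
  intro l
  induction l with
  | nil => intro acc; simp
  | cons a l ih => intro acc; simp [List.foldl_cons, h, ih]

theorem pv_stepA_eq (lc : Int) (acc : List (List Int)) (layer : Int) :
    pvStepA lc acc layer = acc ++ pvGA lc layer := by
  simp only [pvStepA, pvGA]
  apply pv_foldl_ext_append
  intro c1 x
  rw [PySem.List.foldl_append_if]

theorem pv_stepB_eq (lc : Int) (acc : List (List Int)) (layer : Int) :
    pvStepB lc acc layer = acc ++ pvGB lc layer := by
  simp only [pvStepB, pvGB]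
  apply pv_foldl_ext_append
  intro c x
  by_cases h : (x == 0 || x == 2 * (if 2 * layer ≤ lc then layer else lc - 1 - layer) + 1 - 1) = true
  · simp only [if_pos h]
  · simp only [if_neg h]

-- the two edge z's of range(0,s) (s ≥ 3) picked out by the filter
theorem pv_filter_edges (s : Int) (hs : 3 ≤ s) :
    (PySem.List.pyRange 0 s 1).filter (fun z => z == 0 || z == s - 1) = [0, s - 1] := by
  rw [PySem.List.pyRange_one_append 0 1 s (by omega) (by omega),
      PySem.List.pyRange_one_append 1 (s - 1) s (by omega) (by omega)]
  have h1 : PySem.List.pyRange 0 1 1 = [0] := PySem.List.pyRange_one_singleton 0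
  have h2 : PySem.List.pyRange (s - 1) s 1 = [s - 1] := by
    have := PySem.List.pyRange_one_singleton (s - 1)
    rw [show s - 1 + 1 = s by ring] at this
    exact this
  have h3 : (PySem.List.pyRange 1 (s - 1) 1).filter (fun z => z == 0 || z == s - 1) = [] := by
    rw [List.filter_eq_nil_iff]
    intro z hz
    have hmem := PySem.List.mem_pyRange_one.mp hz
    simp only [Bool.or_eq_true, beq_iff_eq, not_or]
    omega
  rw [List.filter_append, List.filter_append, h1, h2, h3]
  simp only [List.filter_cons, List.filter_nil]
  have e1 : ((0:Int) == 0 || (0:Int) == s - 1) = true := by simp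
  have e2 : (s - 1 == 0 || s - 1 == s - 1) = true := by simp
  rw [e1, e2]
  simp

-- one layer: grid scan with perimeter filter = direct perimeter walk
theorem pv_layer_eq (s off y : Int) (hs : 1 ≤ s) :
    (PySem.List.pyRange 0 s 1).flatMap (fun x =>
      ((PySem.List.pyRange 0 s 1).filter
        (fun z => x == 0 || x == s - 1 || z == 0 || z == s - 1)).map
        (fun z => [x + off, y, z + off])) =
    (PySem.List.pyRange 0 s 1).flatMap (fun x =>
      if x == 0 || x == s - 1 then
        (PySem.List.pyRange 0 s 1).map (fun z => [x + off, y, z + off])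
      else
        [[x + off, y, off], [x + off, y, s - 1 + off]]) := by
  apply List.flatMap_congr
  intro x hx
  have hxb := PySem.List.mem_pyRange_one.mp hx
  by_cases hedge : x = 0 ∨ x = s - 1
  · have he : (x == 0 || x == s - 1) = true := by
      rcases hedge with h | h <;> simp [h]
    have hfull : (PySem.List.pyRange 0 s 1).filter
        (fun z => x == 0 || x == s - 1 || z == 0 || z == s - 1) =
        PySem.List.pyRange 0 s 1 := by
      apply List.filter_eq_self.mpr
      intro z _
      rcases hedge with h | h <;> simp [h]
    rw [hfull, he, if_pos rfl]
  · push_neg at hedge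
    have h0 : (x == (0:Int)) = false := beq_eq_false_iff_ne.mpr hedge.1
    have hsm : (x == s - 1) = false := beq_eq_false_iff_ne.mpr hedge.2
    have he : (x == 0 || x == s - 1) = false := by rw [h0, hsm]; rfl
    have hpred : (fun z : Int => x == 0 || x == s - 1 || z == 0 || z == s - 1) =
        (fun z : Int => z == 0 || z == s - 1) := by
      funext z
      rw [h0, hsm]
      simp
    have hs3 : 3 ≤ s := by omega
    rw [hpred, pv_filter_edges s hs3, he, if_neg (by simp)]
    simp only [List.map_cons, List.map_nil]
    rw [show (0:Int) + off = off by ring]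

-- the two branch tests agree
theorem pv_branch_eq (lc layer : Int) :
    (layer ≤ PySem.Int.floordiv lc 2) ↔ (2 * layer ≤ lc) := by
  rw [PySem.Int.floordiv_eq_ediv_of_pos (by omega : (0:Int) < 2)]
  omega

-- per layer, A and B emit the same cubes
theorem pv_g_eq (lc layer : Int) (h0 : 0 ≤ layer) (h1 : layer < lc) :
    pvGA lc layer = pvGB lc layer := by
  simp only [pvGA, pvGB]
  by_cases hc : 2 * layer ≤ lc
  · have hA : layer ≤ PySem.Int.floordiv lc 2 := (pv_branch_eq lc layer).mpr hc
    rw [if_pos hA, if_pos hc]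
    exact pv_layer_eq (2 * layer + 1) (-layer) layer (by omega)
  · have hA : ¬ layer ≤ PySem.Int.floordiv lc 2 := fun h => hc ((pv_branch_eq lc layer).mp h)
    rw [if_neg hA, if_neg hc]
    exact pv_layer_eq (2 * (lc - 1 - layer) + 1) (-(lc - 1 - layer)) layer (by omega)

-- ===== VERDICT (by name: the statement is the Claim_ definition above) =====
theorem generate_diamond_structure_spec : Claim_equal_generate_diamond_structure := by
  intro lc _
  unfold Spec_generate_diamond_structure generate_diamond_structure generate_diamond_structure_alt
  rw [pv_foldl_ext_append (pvStepA lc) (pvGA lc) (pv_stepA_eq lc),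
      pv_foldl_ext_append (pvStepB lc) (pvGB lc) (pv_stepB_eq lc)]
  simp only [List.nil_append]
  apply List.flatMap_congr
  intro layer hlayer
  have hb := PySem.List.mem_pyRange_one.mp hlayer
  exact pv_g_eq lc layer hb.1 hb.2
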